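-- pv_equiv track=rewrite | github.com/marcm24/autocorrect | autocorrect.py | swap
-- ===== SOURCE A (Python) =====
-- def swap(word):
--     split_word = []
--     for i in word:
--         split_word.append(i) # make a list of the word split into letters
--
--
--     swapped_list = []
--     i = 0
--     while i < len(split_word):
--         if i + 1 == len(split_word):
--             break
--         letter_1 = split_word[i]
--         letter_2 = split_word[i + 1] # record the letters we are swapping
--
--         del split_word[i]
--         del split_word[i] # delete the 2 letters which we are swapping
--
--         split_word.insert(i, letter_1)
--         split_word.insert(i, letter_2) # insert the 2 letters in reverse order
--
--         swapped_list.append(''.join(split_word)) # add the joined swapped list to a new list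
--
--         del split_word[i]
--         del split_word[i] # delete the 2 swapped letters
--
--         split_word.insert(i, letter_2)
--         split_word.insert(i, letter_1) # insert back in the original order
--
--         i += 1
--     return swapped_list
-- ===== SOURCE B (Python) =====
-- def swap(word):
--     swapped_list = []
--     for i in range(len(word) - 1):
--         swapped_list.append(word[:i] + word[i + 1] + word[i] + word[i + 2:])
--     return swapped_list
-- ===== Notes on version B (the rewrite author's own statement) =====
-- stated objective: simpler
-- what changed: B treats the word as an immutable string and builds each neighbour-swapped variant directly by slice concatenation word[:i]+word[i+1]+word[i]+word[i+2:], instead of A's mutable character list with del/insert swap-and-undo bookkeeping and a join at every position.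
import Mathlib
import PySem

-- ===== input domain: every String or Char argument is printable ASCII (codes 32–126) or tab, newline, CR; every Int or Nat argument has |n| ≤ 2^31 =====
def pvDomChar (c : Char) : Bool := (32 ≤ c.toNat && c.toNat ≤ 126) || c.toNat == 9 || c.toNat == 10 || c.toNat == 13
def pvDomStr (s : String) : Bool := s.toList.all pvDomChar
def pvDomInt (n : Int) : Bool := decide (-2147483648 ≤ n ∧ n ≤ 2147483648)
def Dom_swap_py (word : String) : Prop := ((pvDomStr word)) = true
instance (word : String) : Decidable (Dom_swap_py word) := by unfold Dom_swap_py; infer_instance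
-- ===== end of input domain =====

-- B replaces A's mutable character list (del/insert swap-and-undo at each position) by
-- building each swapped variant fresh from string slices; return values proved equal on all inputs.

-- ===== PORT A =====
-- del split_word[i]  (always in range in A): pop? at i, keep the remainder
def pvDelAt (xs : List Char) (i : Nat) : List Char :=
  ((PySem.List.pop? xs (i : Int)).map Prod.snd).getD xs

-- the while loop of A; fuel = initial list length (the loop runs len-1 iterations,
-- the list length is invariant: each body deletes two chars and reinserts two)
def pvSwapLoop : Nat → List Char → Nat → List String → List String
  | 0, _, _, acc => acc
  | fuel + 1, sw, i, acc =>
    if i < sw.length then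
      if i + 1 = sw.length then acc
      else
        let letter_1 := PySem.List.pyGetD sw (i : Int) ' '
        let letter_2 := PySem.List.pyGetD sw ((i : Int) + 1) ' '
        let sw1 := pvDelAt (pvDelAt sw i) i
        let sw2 := PySem.List.insert (PySem.List.insert sw1 (i : Int) letter_1) (i : Int) letter_2
        let acc' := acc ++ [String.ofList sw2]
        let sw3 := pvDelAt (pvDelAt sw2 i) i
        let sw4 := PySem.List.insert (PySem.List.insert sw3 (i : Int) letter_2) (i : Int) letter_1
        pvSwapLoop fuel sw4 (i + 1) acc'
    else acc

def swap_py (word : String) : List String :=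
  let split_word := word.toList.foldl (fun acc c => acc ++ [c]) []
  pvSwapLoop split_word.length split_word 0 []

-- ===== PORT B =====
def swap_py_alt (word : String) : List String :=
  (PySem.List.pyRange 0 (PySem.List.len word.toList - 1) 1).foldl
    (fun acc i =>
      acc ++ [String.ofList (PySem.List.slice word.toList none (some i)
                ++ [PySem.List.pyGetD word.toList (i + 1) ' ', PySem.List.pyGetD word.toList i ' ']
                ++ PySem.List.slice word.toList (some (i + 2)) none)]) []

-- ===== PRECONDITION & SPEC =====
def Spec_swap_py (word : String) (out : List String) : Prop := out = swap_py_alt word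
instance (word : String) (out : List String) : Decidable (Spec_swap_py word out) := by unfold Spec_swap_py; infer_instance

-- ===== CLAIM (what is proved, stated in full; the proofs are below) =====
def Claim_equal_swap_py : Prop := ∀ (word : String), Dom_swap_py word → Spec_swap_py word (swap_py word)

-- ===== LEMMAS AND PROOFS =====

-- the common value both programs compute, recursing over the suffix with an explicit prefix
def pvSpec : List Char → List Char → List String
  | pre, a :: b :: rest => String.ofList (pre ++ b :: a :: rest) :: pvSpec (pre ++ [a]) (b :: rest)
  | _, _ => []

lemma pvGetD_mid (pre l : List Char) (x d : Char) :
    (pre ++ x :: l).getD pre.length d = x := by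
  simp [List.getD, List.getElem?_append_right]

lemma pvDelAt_mid (pre l : List Char) (x : Char) :
    pvDelAt (pre ++ x :: l) pre.length = pre ++ l := by
  unfold pvDelAt
  rw [PySem.List.pop?_natCast _ _ (by simp)]
  simp [List.eraseIdx_append_of_length_le (le_refl pre.length)]

lemma pvInsert_mid (pre l : List Char) (v : Char) :
    PySem.List.insert (pre ++ l) (pre.length : Int) v = pre ++ v :: l := by
  rw [PySem.List.insert_natCast _ _ _ (by simp)]
  simp

lemma pvSwapLoop_eq (rest : List Char) : ∀ (pre : List Char) (a b : Char)
    (acc : List String) (fuel : Nat), rest.length + 2 ≤ fuel →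
    pvSwapLoop fuel (pre ++ a :: b :: rest) pre.length acc
      = acc ++ pvSpec pre (a :: b :: rest) := by
  induction rest with
  | nil =>
    intro pre a b acc fuel hf
    match fuel, hf with
    | n + 2, _ =>
      rw [pvSwapLoop]
      have h1 : pre.length < (pre ++ a :: b :: ([] : List Char)).length := by simp
      rw [if_pos h1, if_neg (by simp)]
      simp only [PySem.List.pyGetD_natCast]
      have : ((pre.length : Int) + 1) = ((pre.length + 1 : Nat) : Int) := by push_cast; ring
      rw [this, PySem.List.pyGetD_natCast]
      have hga : (pre ++ a :: b :: ([] : List Char)).getD pre.length ' ' = a := pvGetD_mid _ _ _ _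
      have hgb : (pre ++ a :: b :: ([] : List Char)).getD (pre.length + 1) ' ' = b := by
        have := pvGetD_mid (pre ++ [a]) ([] : List Char) b ' '
        simpa using this
      rw [hga, hgb, pvDelAt_mid, pvDelAt_mid, pvInsert_mid, pvInsert_mid,
          pvDelAt_mid, pvDelAt_mid, pvInsert_mid, pvInsert_mid]
      rw [pvSwapLoop]
      rw [if_pos (by simp : pre.length + 1 < (pre ++ a :: b :: ([] : List Char)).length),
          if_pos (by simp : pre.length + 1 + 1 = (pre ++ a :: b :: ([] : List Char)).length)]
      simp [pvSpec]
  | cons c rest ih =>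
    intro pre a b acc fuel hf
    match fuel, hf with
    | n + 1, hf =>
      rw [pvSwapLoop]
      have h1 : pre.length < (pre ++ a :: b :: c :: rest).length := by simp
      rw [if_pos h1, if_neg (by simp)]
      simp only [PySem.List.pyGetD_natCast]
      have : ((pre.length : Int) + 1) = ((pre.length + 1 : Nat) : Int) := by push_cast; ring
      rw [this, PySem.List.pyGetD_natCast]
      have hga : (pre ++ a :: b :: c :: rest).getD pre.length ' ' = a := pvGetD_mid _ _ _ _
      have hgb : (pre ++ a :: b :: c :: rest).getD (pre.length + 1) ' ' = b := by
        have := pvGetD_mid (pre ++ [a]) (c :: rest) b ' '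
        simpa using this
      rw [hga, hgb, pvDelAt_mid, pvDelAt_mid, pvInsert_mid, pvInsert_mid,
          pvDelAt_mid, pvDelAt_mid, pvInsert_mid, pvInsert_mid]
      have hpre : pre ++ a :: b :: c :: rest = (pre ++ [a]) ++ b :: c :: rest := by simp
      have hlen : pre.length + 1 = (pre ++ [a]).length := by simp
      rw [hpre, hlen, ih (pre ++ [a]) b c _ n (by simpa using hf)]
      simp [pvSpec]

-- A computes pvSpec
lemma swapA_eq (word : String) : swap_py word = pvSpec [] word.toList := by
  unfold swap_py
  rw [PySem.List.foldl_append_singleton_eq_map (fun c => c) word.toList []]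
  simp only [List.nil_append, List.map_id']
  rcases h : word.toList with _ | ⟨a, _ | ⟨b, rest⟩⟩
  · rfl
  · rfl
  · have := pvSwapLoop_eq rest [] a b [] (a :: b :: rest).length (by simp)
    simpa using this

-- flattening pvSpec to B's per-index form
lemma pvSpec_eq_map (s : List Char) : ∀ (pre : List Char),
    pvSpec pre s = (List.range (s.length - 1)).map (fun k =>
      String.ofList ((pre ++ s).take (pre.length + k)
        ++ [(pre ++ s).getD (pre.length + k + 1) ' ', (pre ++ s).getD (pre.length + k) ' ']
        ++ (pre ++ s).drop (pre.length + k + 2))) := by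
  induction s with
  | nil => intro pre; simp [pvSpec]
  | cons a t ih =>
    intro pre
    match t with
    | [] => simp [pvSpec]
    | b :: rest =>
      rw [pvSpec]
      have : (b :: rest).length - 1 + 1 = (a :: b :: rest).length - 1 := by simp
      rw [← this, List.range_succ_eq_map, List.map_cons, List.map_map]
      congr 1
      · have h1 : (pre ++ a :: b :: rest).take (pre.length + 0) = pre := by
          simpa using List.take_left pre (a :: b :: rest)
        have h2 : (pre ++ a :: b :: rest).getD (pre.length + 0 + 1) ' ' = b := by
          have := pvGetD_mid (pre ++ [a]) rest b ' '
          simpa [Nat.add_assoc] using this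
        have h3 : (pre ++ a :: b :: rest).getD (pre.length + 0) ' ' = a := by
          simpa using pvGetD_mid pre (b :: rest) a ' '
        have h4 : (pre ++ a :: b :: rest).drop (pre.length + 0 + 2) = rest := by
          have : pre ++ a :: b :: rest = (pre ++ [a, b]) ++ rest := by simp
          rw [this]
          have hl : (pre ++ [a, b]).length = pre.length + 0 + 2 := by simp
          rw [← hl, List.drop_left]
        rw [h1, h2, h3, h4]
        simp
      · rw [ih (pre ++ [a])]
        apply List.map_congr_left
        intro k _
        have he : pre ++ a :: b :: rest = (pre ++ [a]) ++ b :: rest := by simp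
        simp only [Function.comp]
        rw [he]
        congr 2 <;> simp <;> ring_nf

-- B computes the same map
lemma swapB_eq (word : String) : swap_py_alt word = pvSpec [] word.toList := by
  unfold swap_py_alt
  rw [pvSpec_eq_map word.toList []]
  rw [PySem.List.len_eq]
  rcases h : word.toList with _ | ⟨a, s⟩
  · simp [PySem.List.pyRange]
  · have hlen : ((a :: s).length : Int) - 1 = ((s.length : Nat) : Int) := by
      simp only [List.length_cons]; push_cast; ring
    rw [hlen, PySem.List.pyRange_zero_natCast,
        PySem.List.foldl_append_singleton_eq_map _ _ []]
    rw [List.map_map]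
    simp only [List.nil_append]
    have : (a :: s).length - 1 = s.length := by simp
    rw [this]
    apply List.map_congr_left
    intro k _
    simp only [Function.comp]
    have h1 : ((k : Int) + 1) = ((k + 1 : Nat) : Int) := by push_cast; ring
    have h2 : ((k : Int) + 2) = ((k + 2 : Nat) : Int) := by push_cast; ring
    rw [h1, h2, PySem.List.slice_to_natCast, PySem.List.slice_from_natCast,
        PySem.List.pyGetD_natCast, PySem.List.pyGetD_natCast]
    simp [Nat.add_assoc]

-- ===== VERDICT (by name: the statement is the Claim_ definition above) =====
theorem swap_py_spec : Claim_equal_swap_py := by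
  intro word _
  unfold Spec_swap_py
  rw [swapA_eq, swapB_eq]
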